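-- pv_equiv track=rewrite | github.com/etnarek/info-f-208 | projet4/main.py | seqMatrixes
-- ===== SOURCE A (Python) =====
-- def seqMatrixes(lines):
--     mSeq = []
--     mStruct = []
--     for i, l in enumerate(lines):
--         if i % 3 == 1:
--             mSeq.append(l.strip())
--         elif i % 3 == 2:
--             mStruct.append(l.strip())
--     return mSeq, mStruct
-- ===== SOURCE B (Python) =====
-- def seqMatrixes(lines):
--     lines = list(lines)
--     mSeq = []
--     mStruct = []
--     n = len(lines)
--     i = 0
--     while i + 2 < n:
--         mSeq.append(lines[i + 1].strip())
--         mStruct.append(lines[i + 2].strip())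
--         i += 3
--     if i + 1 < n:
--         mSeq.append(lines[i + 1].strip())
--     return mSeq, mStruct
-- ===== Notes on version B (the rewrite author's own statement) =====
-- stated objective: alternative
-- what changed: Replaces the single enumerate pass with modulo-3 branching by an index loop that advances three lines per iteration (reading positions i+1 and i+2 directly) plus one trailing check, with no modulo arithmetic at all.
import Mathlib
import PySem

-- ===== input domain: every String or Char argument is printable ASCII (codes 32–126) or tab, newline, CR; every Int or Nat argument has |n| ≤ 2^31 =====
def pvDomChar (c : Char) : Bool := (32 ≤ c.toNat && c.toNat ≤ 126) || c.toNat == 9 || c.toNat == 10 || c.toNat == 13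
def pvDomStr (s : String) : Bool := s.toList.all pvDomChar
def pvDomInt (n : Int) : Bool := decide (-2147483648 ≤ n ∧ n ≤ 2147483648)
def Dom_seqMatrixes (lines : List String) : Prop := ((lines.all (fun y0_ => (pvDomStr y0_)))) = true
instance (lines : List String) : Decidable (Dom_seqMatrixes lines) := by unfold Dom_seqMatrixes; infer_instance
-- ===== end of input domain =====

-- B replaces the enumerate+modulo-3 accumulator pass by an index loop that consumes three lines per step (alternative decomposition, same cost).


-- ===== PORT A =====
def seqMatrixes (lines : List String) : List String × List String :=
  (PySem.List.enumerate lines 0).foldl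
    (fun (acc : List String × List String) p =>
      if PySem.Int.mod p.1 3 = 1 then (acc.1 ++ [PySem.Str.strip p.2], acc.2)
      else if PySem.Int.mod p.1 3 = 2 then (acc.1, acc.2 ++ [PySem.Str.strip p.2])
      else acc)
    ([], [])

-- ===== PORT B =====
-- while i + 2 < n: append lines[i+1].strip(), lines[i+2].strip(); i += 3  (in-range reads, ported as getD)
def seqLoop (lines : List String) (i : Nat) (mSeq mStruct : List String) :
    List String × List String :=
  if i + 2 < lines.length then
    seqLoop lines (i + 3) (mSeq ++ [PySem.Str.strip (lines.getD (i + 1) "")])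
      (mStruct ++ [PySem.Str.strip (lines.getD (i + 2) "")])
  else if i + 1 < lines.length then
    (mSeq ++ [PySem.Str.strip (lines.getD (i + 1) "")], mStruct)
  else (mSeq, mStruct)
termination_by lines.length - i

def seqMatrixes_alt (lines : List String) : List String × List String :=
  seqLoop lines 0 [] []

-- ===== PRECONDITION & SPEC =====
def Spec_seqMatrixes (lines : List String) (out : List String × List String) : Prop := out = seqMatrixes_alt lines
instance (lines : List String) (out : List String × List String) : Decidable (Spec_seqMatrixes lines out) := by unfold Spec_seqMatrixes; infer_instance

-- ===== CLAIM (what is proved, stated in full; the proofs are below) =====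
def Claim_equal_seqMatrixes : Prop := ∀ (lines : List String), Dom_seqMatrixes lines → Spec_seqMatrixes lines (seqMatrixes lines)

-- ===== LEMMAS AND PROOFS =====
-- proof-only chunked recursion bridging the two ports
def seqGo : List String → List String × List String
  | [] => ([], [])
  | [_] => ([], [])
  | [_, b] => ([PySem.Str.strip b], [])
  | _ :: b :: c :: rest =>
    let st := seqGo rest
    (PySem.Str.strip b :: st.1, PySem.Str.strip c :: st.2)

-- seqLoop from index i computes seqGo of the remaining suffix, appended to the accumulators.
lemma seqLoop_go (lines : List String) (i : Nat) (s t : List String) :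
    seqLoop lines i s t = (s ++ (seqGo (lines.drop i)).1, t ++ (seqGo (lines.drop i)).2) := by
  induction i, s, t using seqLoop.induct lines with
  | case1 i s t h ih =>
    rw [seqLoop, if_pos h, ih]
    have hd : lines.drop i = lines[i] :: lines[i+1] :: lines[i+2] :: lines.drop (i+3) := by
      rw [List.drop_eq_getElem_cons (by omega), List.drop_eq_getElem_cons (by omega),
        List.drop_eq_getElem_cons (by omega)]
    rw [hd]
    simp [seqGo, List.getElem?_eq_getElem (by omega : i + 1 < lines.length),
      List.getElem?_eq_getElem (by omega : i + 2 < lines.length)]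
  | case2 i s t h h1 =>
    rw [seqLoop, if_neg h, if_pos h1]
    have hd : lines.drop i = lines[i] :: lines[i+1] :: lines.drop (i+2) := by
      rw [List.drop_eq_getElem_cons (by omega), List.drop_eq_getElem_cons (by omega)]
    have he : lines.drop (i+2) = [] := List.drop_eq_nil_of_le (by omega)
    rw [hd, he]
    simp [seqGo, List.getElem?_eq_getElem (by omega : i + 1 < lines.length)]
  | case3 i s t h h1 =>
    rw [seqLoop, if_neg h, if_neg h1]
    rcases Nat.lt_or_ge i lines.length with hi | hi
    · have hd : lines.drop i = lines[i] :: lines.drop (i+1) := List.drop_eq_getElem_cons (by omega)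
      have he : lines.drop (i+1) = [] := List.drop_eq_nil_of_le (by omega)
      rw [hd, he]; simp [seqGo]
    · rw [List.drop_eq_nil_of_le (by omega)]; simp [seqGo]



-- A's fold body with Python mod equals the same body with Int.emod (divisor 3 > 0).
lemma seqFun_eq :
    (fun (acc : List String × List String) (p : Int × String) =>
      if PySem.Int.mod p.1 3 = 1 then (acc.1 ++ [PySem.Str.strip p.2], acc.2)
      else if PySem.Int.mod p.1 3 = 2 then (acc.1, acc.2 ++ [PySem.Str.strip p.2])
      else acc)
    = (fun (acc : List String × List String) (p : Int × String) =>
      if p.1 % 3 = 1 then (acc.1 ++ [PySem.Str.strip p.2], acc.2)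
      else if p.1 % 3 = 2 then (acc.1, acc.2 ++ [PySem.Str.strip p.2])
      else acc) := by
  funext acc p
  rw [PySem.Int.mod_eq_emod_of_pos (by omega)]

-- The fold of A over enumerate starting at a multiple of 3 appends exactly what seqGo produces.
lemma seqFold_go (xs : List String) (n : Int) (hn0 : 0 ≤ n) (hn : n % 3 = 0)
    (s t : List String) :
    (PySem.List.enumerate xs n).foldl
      (fun (acc : List String × List String) p =>
        if p.1 % 3 = 1 then (acc.1 ++ [PySem.Str.strip p.2], acc.2)
        else if p.1 % 3 = 2 then (acc.1, acc.2 ++ [PySem.Str.strip p.2])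
        else acc)
      (s, t)
    = (s ++ (seqGo xs).1, t ++ (seqGo xs).2) := by
  induction xs using seqGo.induct generalizing n s t with
  | case1 => simp [PySem.List.enumerate_nil, seqGo]
  | case2 a =>
    simp [PySem.List.enumerate_cons, PySem.List.enumerate_nil, seqGo, hn]
  | case3 a b =>
    have e1 : (n + 1) % 3 = 1 := by omega
    simp [PySem.List.enumerate_cons, PySem.List.enumerate_nil, seqGo, hn, e1]
  | case4 a b c rest ih =>
    have e1 : (n + 1) % 3 = 1 := by omega
    have e2 : (n + 1 + 1) % 3 = 2 := by omega
    rw [PySem.List.enumerate_cons, PySem.List.enumerate_cons, PySem.List.enumerate_cons]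
    simp only [List.foldl_cons, hn, e1, e2]
    norm_num
    rw [ih (n + 1 + 1 + 1) (by omega) (by omega)]
    simp [seqGo]

-- ===== VERDICT (by name: the statement is the Claim_ definition above) =====
theorem seqMatrixes_spec : Claim_equal_seqMatrixes := by
  intro lines _
  unfold Spec_seqMatrixes seqMatrixes seqMatrixes_alt
  rw [seqFun_eq, seqFold_go lines 0 (by omega) (by decide) [] [], seqLoop_go lines 0 [] []]
  simp
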